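-- pv_equiv track=rewrite | github.com/pypi-data/pypi-mirror-401 | packages/zut/zut-4.0.5-py3-none-any.whl/zut/numbers.py | _check_thousand_separator
-- ===== SOURCE A (Python) =====
-- def _check_thousand_separator(text: str, thousand_separator: str):
--     """
--     Determine if the given separator may be a thousands separator of the text.
--     """
--     decimal_separator = '.' if thousand_separator == ',' else ','
--     decimal_separator_pos = text.rfind(decimal_separator)
--
--     group_i = 0
--     at_least_one_separator = False
--     for char in reversed(text[0:decimal_separator_pos] if decimal_separator_pos >= 0 else text):
--         if group_i < 3:
--             if not char.isdigit():
--                 return False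
--             group_i += 1
--         else: # group_i == 3
--             if char != thousand_separator:
--                 return False
--             at_least_one_separator = True
--             group_i = 0 # next group will start
--
--     return at_least_one_separator
-- ===== SOURCE B (Python) =====
-- def _check_thousand_separator(text: str, thousand_separator: str):
--     """
--     Determine if the given separator may be a thousands separator of the text.
--     Tokenize-then-validate re-implementation: split the integer part on the
--     separator and check the group lengths/digits instead of scanning char by char.
--     """
--     if len(thousand_separator) != 1:
--         return False
--     decimal_separator = '.' if thousand_separator == ',' else ','
--     decimal_separator_pos = text.rfind(decimal_separator)
--     part = text[0:decimal_separator_pos] if decimal_separator_pos >= 0 else text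
--     tokens = part.split(thousand_separator)
--     if len(tokens) < 2:
--         return False
--     if not all(len(t) == 3 and t.isdigit() for t in tokens[1:]):
--         return False
--     first = tokens[0]
--     return len(first) <= 3 and (first == '' or first.isdigit())
-- ===== Notes on version B (the rewrite author's own statement) =====
-- stated objective: alternative
-- what changed: Replaces A's stateful reversed char-by-char scan (group counter + seen-separator flag) with a staged tokenize-then-validate pass: split the integer part on the separator and check that every non-first token is exactly three digits and the first token is at most three digits (possibly empty).
-- outside the precondition, e.g. on _check_thousand_separator('5555555', '5'): A returns True, B returns False
import Mathlib
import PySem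

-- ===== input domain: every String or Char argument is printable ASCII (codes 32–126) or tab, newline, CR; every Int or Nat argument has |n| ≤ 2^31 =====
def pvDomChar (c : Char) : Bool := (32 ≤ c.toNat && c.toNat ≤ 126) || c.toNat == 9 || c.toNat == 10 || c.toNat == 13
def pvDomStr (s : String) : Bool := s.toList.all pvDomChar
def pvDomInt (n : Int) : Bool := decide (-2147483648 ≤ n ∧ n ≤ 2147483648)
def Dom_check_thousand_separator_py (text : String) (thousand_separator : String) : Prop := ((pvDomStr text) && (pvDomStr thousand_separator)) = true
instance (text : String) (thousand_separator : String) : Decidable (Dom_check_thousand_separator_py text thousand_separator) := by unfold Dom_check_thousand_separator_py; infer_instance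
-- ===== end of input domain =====

-- B replaces A's stateful reversed char scan with a tokenize-then-validate decomposition
-- (split the integer part on the separator, then check group lengths and digits); objective: alternative.

-- Shared first lines of both Pythons: decimal_separator, its rfind position, and the
-- slice text[0:pos] (or the whole text).
def pvIntegerPart (text : String) (thousand_separator : String) : List Char :=
  let decimal_separator : List Char := if thousand_separator.toList = [','] then ['.'] else [',']
  let decimal_separator_pos := PySem.Chars.rfind text.toList decimal_separator
  if decimal_separator_pos ≥ 0
    then PySem.Chars.slice text.toList (some 0) (some decimal_separator_pos)
    else text.toList

-- ===== PORT A =====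
-- A's for-loop over reversed(integer part): state (group_i, at_least_one_separator),
-- early 'return False' becomes returning false.
def pvALoop (ts : List Char) : List Char → Nat → Bool → Bool
  | [], _, seen => seen
  | c :: rest, group_i, seen =>
    if group_i < 3 then
      if !(PySem.Chars.isdigit c) then false
      else pvALoop ts rest (group_i + 1) seen
    else -- group_i == 3
      if [c] ≠ ts then false
      else pvALoop ts rest 0 true

def check_thousand_separator_py (text : String) (thousand_separator : String) : Bool :=
  pvALoop thousand_separator.toList (pvIntegerPart text thousand_separator).reverse 0 false

-- ===== PORT B =====
-- Source B: guard on len(sep) != 1, split the integer part on the separator, require at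
-- least two tokens, every non-first token exactly three digits, the first token at
-- most three chars and empty or all digits.
def check_thousand_separator_py_alt (text : String) (thousand_separator : String) : Bool :=
  if thousand_separator.toList.length ≠ 1 then false
  else
    let part := pvIntegerPart text thousand_separator
    let tokens := PySem.Chars.splitOn part thousand_separator.toList
    if tokens.length < 2 then false
    else if !(tokens.tail.all fun t => (t.length == 3) && PySem.Chars.strIsdigit t) then false
    else
      let first := tokens.head!
      decide (first.length ≤ 3) && (first.isEmpty || PySem.Chars.strIsdigit first)

-- ===== PRECONDITION & SPEC =====
-- Pre_ excludes separators that are a single digit character: there A's positional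
-- digit-vs-separator classification and B's token grouping are both defensible readings
-- of a nonsense corner (a digit cannot be a thousands separator) and may disagree.
def Pre_check_thousand_separator_py (text : String) (thousand_separator : String) : Prop :=
  ¬ (thousand_separator.toList.length = 1 ∧ PySem.Chars.strIsdigit thousand_separator.toList = true)
instance (text : String) (thousand_separator : String) : Decidable (Pre_check_thousand_separator_py text thousand_separator) := by unfold Pre_check_thousand_separator_py; infer_instance

def pvWitness_check_thousand_separator_py : String × String := ("1,234", ",")

def Spec_check_thousand_separator_py (text : String) (thousand_separator : String) (out : Bool) : Prop := out = check_thousand_separator_py_alt text thousand_separator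
instance (text : String) (thousand_separator : String) (out : Bool) : Decidable (Spec_check_thousand_separator_py text thousand_separator out) := by unfold Spec_check_thousand_separator_py; infer_instance

-- ===== CLAIM (what is proved, stated in full; the proofs are below) =====
def Claim_equal_check_thousand_separator_py : Prop := ∀ (text : String) (thousand_separator : String), Dom_check_thousand_separator_py text thousand_separator → Pre_check_thousand_separator_py text thousand_separator → Spec_check_thousand_separator_py text thousand_separator (check_thousand_separator_py text thousand_separator)

-- ===== LEMMAS AND PROOFS =====

-- A simple structural model of str.split with a one-char separator.
def pvSplit (s : Char) : List Char → List (List Char)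
  | [] => [[]]
  | c :: rest =>
    if c = s then [] :: pvSplit s rest
    else match pvSplit s rest with
      | [] => [[c]]
      | h :: t => (c :: h) :: t

lemma pvSplit_ne_nil (s : Char) (l : List Char) : pvSplit s l ≠ [] := by
  cases l with
  | nil => simp [pvSplit]
  | cons c rest =>
    simp only [pvSplit]
    split_ifs
    · simp
    · cases pvSplit s rest <;> simp

lemma pvSplitOn_go_eq (s : Char) : ∀ (fuel : Nat) (l cur : List Char) (acc : List (List Char)),
    l.length ≤ fuel →
    PySem.Chars.splitOn.go [s] fuel l cur acc =
      acc.reverse ++ (match pvSplit s l with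
        | [] => []
        | h :: t => (cur.reverse ++ h) :: t) := by
  intro fuel
  induction fuel with
  | zero =>
    intro l cur acc hl
    have : l = [] := by cases l <;> simp_all
    subst this
    simp [PySem.Chars.splitOn.go, pvSplit]
  | succ fuel ih =>
    intro l cur acc hl
    cases l with
    | nil => simp [PySem.Chars.splitOn.go, pvSplit]
    | cons c rest =>
      simp only [PySem.Chars.splitOn.go, List.isPrefixOf, List.isPrefixOf_nil_left, Bool.and_true]
      by_cases hc : s = c
      · subst hc
        simp only [beq_self_eq_true, if_true, List.length_cons, List.drop_succ_cons,
          List.length_nil, List.drop_zero]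
        rw [ih rest [] (cur.reverse :: acc) (by simpa using hl)]
        have hne := pvSplit_ne_nil s rest
        cases hh : pvSplit s rest with
        | nil => exact absurd hh hne
        | cons h t => simp [pvSplit, hh]
      · have : (s == c) = false := by simp [hc]
        simp only [this, Bool.false_eq_true, if_false]
        rw [ih rest (c :: cur) acc (by simpa using hl)]
        have hne := pvSplit_ne_nil s rest
        cases hh : pvSplit s rest with
        | nil => exact absurd hh hne
        | cons h t =>
          simp [pvSplit, Ne.symm hc, hh, List.append_assoc]

lemma pvSplitOn_eq (s : Char) (l : List Char) :
    PySem.Chars.splitOn l [s] = pvSplit s l := by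
  unfold PySem.Chars.splitOn
  rw [pvSplitOn_go_eq s (l.length + 1) l [] [] (by omega)]
  have hne := pvSplit_ne_nil s l
  cases hh : pvSplit s l with
  | nil => exact absurd hh hne
  | cons h t => simp

-- Appending one char to the last token.
def pvAppLast (c : Char) : List (List Char) → List (List Char)
  | [] => [[c]]
  | [t] => [t ++ [c]]
  | t :: u :: rest => t :: pvAppLast c (u :: rest)

lemma pvAppLast_concat (c : Char) : ∀ (M : List (List Char)) (x : List Char),
    pvAppLast c (M ++ [x]) = M ++ [x ++ [c]] := by
  intro M
  induction M with
  | nil => intro x; simp [pvAppLast]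
  | cons m M' ih =>
    intro x
    cases M' with
    | nil => simp [pvAppLast]
    | cons u R => simpa [pvAppLast] using ih x

lemma pvSplit_concat (s c : Char) : ∀ (a : List Char),
    pvSplit s (a ++ [c]) =
      if c = s then pvSplit s a ++ [[]] else pvAppLast c (pvSplit s a) := by
  intro a
  induction a with
  | nil =>
    by_cases hc : c = s <;> simp [pvSplit, hc, pvAppLast]
  | cons x a' ih =>
    simp only [List.cons_append, pvSplit]
    rw [ih]
    by_cases hx : x = s
    · simp only [if_pos hx]
      by_cases hc : c = s
      · simp [hc]
      · simp only [if_neg hc]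
        cases hh : pvSplit s a' with
        | nil => exact absurd hh (pvSplit_ne_nil s a')
        | cons h t => simp [hh, pvAppLast]
    · simp only [if_neg hx]
      by_cases hc : c = s
      · simp only [if_pos hc]
        cases hh : pvSplit s a' with
        | nil => exact absurd hh (pvSplit_ne_nil s a')
        | cons h t => simp [hh]
      · simp only [if_neg hc]
        cases hh : pvSplit s a' with
        | nil => exact absurd hh (pvSplit_ne_nil s a')
        | cons h t =>
          cases t with
          | nil => simp [hh, pvAppLast]
          | cons u r => simp [hh, pvAppLast]

lemma pvSplit_reverse (s : Char) : ∀ (l : List Char),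
    pvSplit s l.reverse = ((pvSplit s l).map List.reverse).reverse := by
  intro l
  induction l with
  | nil => simp [pvSplit]
  | cons c t ih =>
    have : (c :: t).reverse = t.reverse ++ [c] := by simp
    rw [this, pvSplit_concat s c t.reverse, ih]
    by_cases hc : c = s
    · subst hc
      simp [pvSplit]
    · simp only [hc, if_false, pvSplit]
      have hne := pvSplit_ne_nil s t
      cases hh : pvSplit s t with
      | nil => exact absurd hh hne
      | cons h t' =>
        simp [pvSplit, hc, hh, pvAppLast_concat]

-- The token-level reading of A's loop state: g digits already consumed of the current
-- (rightmost unfinished) group, seen = a separator has been consumed.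
def pvPcheck (g : Nat) (seen : Bool) : List (List Char) → Bool
  | [] => true
  | [t] => seen && t.all PySem.Chars.isdigit && decide (g + t.length ≤ 3)
  | t :: u :: rest => (t.all PySem.Chars.isdigit && (g + t.length == 3)) && pvPcheck 0 true (u :: rest)

lemma pvALoop_split (s : Char) (hd : PySem.Chars.isdigit s = false) :
    ∀ (l : List Char) (g : Nat) (seen : Bool), g ≤ 3 →
    pvALoop [s] l g seen = pvPcheck g seen (pvSplit s l) := by
  intro l
  induction l with
  | nil =>
    intro g seen hg
    simp [pvALoop, pvSplit, pvPcheck, hg]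
  | cons c rest ih =>
    intro g seen hg
    have hne := pvSplit_ne_nil s rest
    by_cases hc : s = c
    · subst hc
      by_cases hg3 : g < 3
      · cases hh : pvSplit s rest with
        | nil => exact absurd hh hne
        | cons h t =>
          simp [pvALoop, hd, pvSplit, hh, pvPcheck, hg3, show g ≠ 3 by omega]
      · have hgeq : g = 3 := by omega
        subst hgeq
        cases hh : pvSplit s rest with
        | nil => exact absurd hh hne
        | cons h t =>
          rw [show pvALoop [s] (s :: rest) 3 seen = pvALoop [s] rest 0 true by simp [pvALoop]]
          rw [ih 0 true (by omega), hh]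
          simp [pvSplit, hh, pvPcheck]
    · have hc' : c ≠ s := fun h => hc h.symm
      cases hh : pvSplit s rest with
      | nil => exact absurd hh hne
      | cons h t =>
        have hsplit : pvSplit s (c :: rest) = (c :: h) :: t := by simp [pvSplit, hc', hh]
        by_cases hg3 : g < 3
        · by_cases hdc : PySem.Chars.isdigit c = true
          · rw [show pvALoop [s] (c :: rest) g seen = pvALoop [s] rest (g + 1) seen by
              simp [pvALoop, hg3, hdc]]
            rw [ih (g + 1) seen (by omega), hh, hsplit]
            have he : g + (h.length + 1) = g + 1 + h.length := by omega
            cases t with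
            | nil => simp [pvPcheck, hdc, he, Bool.and_assoc]
            | cons u r => simp [pvPcheck, hdc, he]
          · have hdc' : PySem.Chars.isdigit c = false := by simpa using hdc
            rw [show pvALoop [s] (c :: rest) g seen = false by simp [pvALoop, hg3, hdc']]
            rw [hsplit]
            cases t with
            | nil => simp [pvPcheck, hdc']
            | cons u r => simp [pvPcheck, hdc']
        · have hgeq : g = 3 := by omega
          subst hgeq
          rw [show pvALoop [s] (c :: rest) 3 seen = false by simp [pvALoop, hc']]
          rw [hsplit]
          cases t with
          | nil =>
            have : ¬ (3 + (c :: h).length ≤ 3) := by simp only [List.length_cons]; omega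
            simp [pvPcheck, this]
          | cons u r =>
            have : ¬ (3 + (c :: h).length = 3) := by simp only [List.length_cons]; omega
            simp [pvPcheck, this]

-- An exactly-three-digit group.
def pvEx3 (t : List Char) : Bool := t.all PySem.Chars.isdigit && (t.length == 3)

lemma pvPcheck_append (tl : List Char) : ∀ (M : List (List Char)) (seen : Bool),
    pvPcheck 0 seen (M ++ [tl]) =
      ((if M.isEmpty then seen else M.all pvEx3) && tl.all PySem.Chars.isdigit && decide (tl.length ≤ 3)) := by
  intro M
  induction M with
  | nil => intro seen; simp [pvPcheck]
  | cons x M' ih =>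
    intro seen
    cases M' with
    | nil => simp [pvPcheck, pvEx3, Bool.and_assoc]
    | cons y R =>
      rw [show ((x :: y :: R) ++ [tl]) = x :: ((y :: R) ++ [tl]) by simp]
      rw [show pvPcheck 0 seen (x :: ((y :: R) ++ [tl]))
            = ((x.all PySem.Chars.isdigit && (0 + x.length == 3)) && pvPcheck 0 true ((y :: R) ++ [tl])) by
          cases hh : (y :: R) ++ [tl] with
          | nil => simp at hh
          | cons a b => simp [hh, pvPcheck]]
      rw [ih true]
      simp [pvEx3, Bool.and_assoc]

lemma pvEx3_token (x : List Char) :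
    ((x.length == 3) && PySem.Chars.strIsdigit x) = pvEx3 x := by
  cases x with
  | nil => simp [pvEx3, PySem.Chars.strIsdigit]
  | cons c r => simp [pvEx3, PySem.Chars.strIsdigit, Bool.and_comm]

lemma pvEx3_reverse (x : List Char) : pvEx3 x.reverse = pvEx3 x := by
  simp [pvEx3]

lemma pvALoop_no_sep (ts : List Char) (h : ∀ c : Char, [c] ≠ ts) :
    ∀ (l : List Char) (g : Nat), pvALoop ts l g false = false := by
  intro l
  induction l with
  | nil => intro g; simp [pvALoop]
  | cons c rest ih =>
    intro g
    simp only [pvALoop]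
    split_ifs with h1 h2
    · rfl
    · exact ih (g + 1)
    · rfl
    · exact absurd (by simpa using ‹¬ [c] ≠ ts›) (h c)

-- ===== VERDICT (by name: the statement is the Claim_ definition above) =====
theorem check_thousand_separator_py_spec : Claim_equal_check_thousand_separator_py := by
  intro text ts _hdom hpre
  unfold Spec_check_thousand_separator_py
  unfold check_thousand_separator_py check_thousand_separator_py_alt
  by_cases hlen : ts.toList.length = 1
  · obtain ⟨s, hs⟩ : ∃ s, ts.toList = [s] := by
      cases hts : ts.toList with
      | nil => simp [hts] at hlen
      | cons a b =>
        cases b with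
        | nil => exact ⟨a, rfl⟩
        | cons u v => simp [hts] at hlen
    have hd : PySem.Chars.isdigit s = false := by
      by_contra hdig
      exact hpre ⟨hlen, by simp [hs, PySem.Chars.strIsdigit, by simpa using hdig]⟩
    rw [hs]
    rw [if_neg (show ¬ (([s] : List Char).length ≠ 1) by simp)]
    generalize pvIntegerPart text ts = part
    rw [pvALoop_split s hd part.reverse 0 false (by omega), pvSplit_reverse s part]
    simp only [pvSplitOn_eq]
    have hne := pvSplit_ne_nil s part
    cases hh : pvSplit s part with
    | nil => exact absurd hh hne
    | cons h t =>
      rw [show ((h :: t).map List.reverse).reverse = (t.map List.reverse).reverse ++ [h.reverse] by simp]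
      rw [pvPcheck_append]
      cases t with
      | nil => simp [pvPcheck]
      | cons u t' =>
        have hM : ((u :: t').map List.reverse).reverse.isEmpty = false := by simp
        rw [hM]
        have hall : ((u :: t').map List.reverse).reverse.all pvEx3 = (u :: t').all pvEx3 := by
          simp [List.all_reverse, List.all_map, Function.comp_def, pvEx3_reverse, Bool.and_comm]
        rw [if_neg (by simp), hall]
        have htok : (fun t => (t.length == 3) && PySem.Chars.strIsdigit t) = pvEx3 :=
          funext pvEx3_token
        simp only [List.tail_cons, List.head!]
        rw [if_neg (show ¬ ((h :: u :: t').length < 2) by simp only [List.length_cons]; omega),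
            htok]
        have hfirst : (h.isEmpty || PySem.Chars.strIsdigit h) = h.all PySem.Chars.isdigit := by
          cases h <;> simp [PySem.Chars.strIsdigit]
        rw [hfirst]
        have hrevall : h.reverse.all PySem.Chars.isdigit = h.all PySem.Chars.isdigit := by simp
        have hrevlen : h.reverse.length = h.length := by simp
        rw [hrevall, hrevlen]
        cases hA : (u :: t').all pvEx3 <;> cases hB : h.all PySem.Chars.isdigit <;>
          by_cases hL : h.length ≤ 3 <;> simp [hL]
  · have hA : pvALoop ts.toList (pvIntegerPart text ts).reverse 0 false = false := by
      apply pvALoop_no_sep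
      · intro c hc
        apply hlen
        rw [← hc]
        rfl
    rw [hA, if_pos hlen]
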